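-- pv_equiv track=rewrite | github.com/sahreen-haider/IDS | src/detector.py | classify_intrusion_type
-- ===== SOURCE A (Python) =====
-- from typing import List, Dict, Tuple, Optional
--
-- def classify_intrusion_type(detections: List[Dict]) -> str:
--     """
--     Classify type of intrusion
--
--     Args:
--         detections: List of detections
--
--     Returns:
--         Intrusion type: 'human', 'animal', 'object', or 'multiple'
--     """
--     if not detections:
--         return 'none'
--
--     class_names = [det['class_name'] for det in detections]
--
--     has_human = 'person' in class_names
--     has_animal = any(c in ['dog', 'cat', 'bird'] for c in class_names)
--     has_object = any(c not in ['person', 'dog', 'cat', 'bird'] for c in class_names)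
--
--     types = []
--     if has_human:
--         types.append('human')
--     if has_animal:
--         types.append('animal')
--     if has_object:
--         types.append('object')
--
--     if len(types) > 1:
--         return 'multiple'
--     elif types:
--         return types[0]
--     else:
--         return 'unknown'
-- ===== SOURCE B (Python) =====
-- def classify_intrusion_type(detections):
--     """
--     Classify type of intrusion
--
--     Single pass: classify each detection into its category once, collect the
--     categories in a set, then read the verdict off the set in priority order.
--     """
--     if not detections:
--         return 'none'
--     present = set()
--     for det in detections:
--         c = det['class_name']
--         if c == 'person':
--             present.add('human')
--         elif c in ('dog', 'cat', 'bird'):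
--             present.add('animal')
--         else:
--             present.add('object')
--     types = [t for t in ('human', 'animal', 'object') if t in present]
--     return 'multiple' if len(types) > 1 else types[0]
-- ===== Notes on version B (the rewrite author's own statement) =====
-- stated objective: simpler
-- what changed: B replaces A's three separate membership scans over the class-name list by one classifying pass that puts each detection's category into a set, then reads the result off the set in fixed priority order.
import Mathlib
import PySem

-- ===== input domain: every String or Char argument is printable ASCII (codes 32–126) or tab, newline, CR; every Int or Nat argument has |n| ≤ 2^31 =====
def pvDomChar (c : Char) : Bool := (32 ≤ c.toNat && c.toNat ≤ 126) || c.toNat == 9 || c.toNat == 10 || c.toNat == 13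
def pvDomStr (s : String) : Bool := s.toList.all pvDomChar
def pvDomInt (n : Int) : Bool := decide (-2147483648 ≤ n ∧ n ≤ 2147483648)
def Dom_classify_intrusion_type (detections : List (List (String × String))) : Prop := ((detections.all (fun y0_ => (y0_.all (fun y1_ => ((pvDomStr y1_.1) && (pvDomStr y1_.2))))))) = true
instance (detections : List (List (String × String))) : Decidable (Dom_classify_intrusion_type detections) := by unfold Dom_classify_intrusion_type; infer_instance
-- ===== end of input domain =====

-- B replaces A's three membership scans by a single classifying pass into a category set (objective: simpler).


-- det['class_name']: first matching key (assoc-list dict); total form used under Pre_ (key present)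
def pvGetClassName (det : List (String × String)) : String :=
  ((det.find? (fun p => p.1 == "class_name")).map Prod.snd).getD ""

-- ===== PORT A =====
def classify_intrusion_type (detections : List (List (String × String))) : String :=
  if detections.isEmpty then "none" else
  let class_names := detections.map pvGetClassName
  let has_human := class_names.contains "person"
  let has_animal := class_names.any (fun c => ["dog", "cat", "bird"].contains c)
  let has_object := class_names.any (fun c => !(["person", "dog", "cat", "bird"].contains c))
  let types := (if has_human then ["human"] else []) ++
               (if has_animal then ["animal"] else []) ++
               (if has_object then ["object"] else [])
  if 1 < types.length then "multiple"
  else match types with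
    | t :: _ => t
    | [] => "unknown"

-- ===== PORT B =====
def pvCategory (c : String) : String :=
  if c == "person" then "human"
  else if c == "dog" || c == "cat" || c == "bird" then "animal"
  else "object"

def classify_intrusion_type_alt (detections : List (List (String × String))) : String :=
  if detections.isEmpty then "none" else
  let present : PySem.Set String :=
    detections.foldl (fun s det => PySem.Set.add s (pvCategory (pvGetClassName det))) PySem.Set.empty
  let types := ["human", "animal", "object"].filter (fun t => PySem.Set.contains present t)
  if 1 < types.length then "multiple"
  else (PySem.List.pyGet? types 0).getD ""   -- types[0]; types is provably nonempty here

-- ===== PRECONDITION & SPEC =====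
-- Pre_ excludes detections missing the 'class_name' key, on which Python A (and B) raise KeyError.
def Pre_classify_intrusion_type (detections : List (List (String × String))) : Prop :=
  ∀ det ∈ detections, "class_name" ∈ det.map Prod.fst
instance (detections : List (List (String × String))) : Decidable (Pre_classify_intrusion_type detections) := by unfold Pre_classify_intrusion_type; infer_instance

def pvWitness_classify_intrusion_type : (List (List (String × String))) :=
  [[("class_name", "person")], [("class_name", "car")]]

def Spec_classify_intrusion_type (detections : List (List (String × String))) (out : String) : Prop := out = classify_intrusion_type_alt detections
instance (detections : List (List (String × String))) (out : String) : Decidable (Spec_classify_intrusion_type detections out) := by unfold Spec_classify_intrusion_type; infer_instance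

-- ===== CLAIM (what is proved, stated in full; the proofs are below) =====
def Claim_equal_classify_intrusion_type : Prop := ∀ (detections : List (List (String × String))), Dom_classify_intrusion_type detections → Pre_classify_intrusion_type detections → Spec_classify_intrusion_type detections (classify_intrusion_type detections)

-- ===== LEMMAS AND PROOFS =====

lemma pvCategory_eq_human (c : String) : pvCategory c = "human" ↔ c = "person" := by
  unfold pvCategory
  split_ifs with h1 h2 <;> simp_all

lemma pvCategory_eq_animal (c : String) :
    pvCategory c = "animal" ↔ c = "dog" ∨ c = "cat" ∨ c = "bird" := by
  unfold pvCategory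
  split_ifs with h1 h2 <;> simp_all <;> tauto

lemma pvCategory_eq_object (c : String) :
    pvCategory c = "object" ↔ ¬(c = "person" ∨ c = "dog" ∨ c = "cat" ∨ c = "bird") := by
  unfold pvCategory
  split_ifs with h1 h2 <;> simp_all <;> tauto

lemma pvCategory_total (c : String) :
    pvCategory c = "human" ∨ pvCategory c = "animal" ∨ pvCategory c = "object" := by
  unfold pvCategory
  split_ifs <;> simp

lemma present_eq (detections : List (List (String × String))) :
    (detections.foldl (fun s det => PySem.Set.add s (pvCategory (pvGetClassName det))) PySem.Set.empty : PySem.Set String)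
    = PySem.Set.ofList (detections.map (fun det => pvCategory (pvGetClassName det))) := by
  rw [← PySem.Set.update_map_eq_foldl_add]
  exact PySem.Set.update_nil_left _

set_option maxRecDepth 8000 in
set_option maxHeartbeats 1600000 in
theorem classify_eq (detections : List (List (String × String))) :
    classify_intrusion_type detections = classify_intrusion_type_alt detections := by
  unfold classify_intrusion_type classify_intrusion_type_alt
  cases detections with
  | nil => rfl
  | cons d0 rest =>
    rw [present_eq]
    simp only [List.isEmpty_cons, Bool.false_eq_true, if_false, List.map_cons]
    have key : ∀ t : String,
        (PySem.Set.ofList ((pvCategory (pvGetClassName d0)) :: rest.map (fun det => pvCategory (pvGetClassName det)))).contains t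
        = (pvGetClassName d0 :: rest.map pvGetClassName).any (fun c => pvCategory c == t) := by
      intro t
      rw [Bool.eq_iff_iff, PySem.Set.contains_iff]
      simp [PySem.Set.mem_ofList, List.any_eq_true, eq_comm (a := t)]
    simp only [List.filter_cons, List.filter_nil, key]
    have e1 : ((pvGetClassName d0 :: rest.map pvGetClassName).any fun c => pvCategory c == "human")
        = (pvGetClassName d0 :: rest.map pvGetClassName).contains "person" := by
      rw [Bool.eq_iff_iff]
      simp only [List.any_eq_true, List.contains_eq_mem, beq_iff_eq, pvCategory_eq_human,
        decide_eq_true_eq]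
      constructor
      · rintro ⟨x, hx, rfl⟩; exact hx
      · intro h; exact ⟨_, h, rfl⟩
    have e2 : ((pvGetClassName d0 :: rest.map pvGetClassName).any fun c => pvCategory c == "animal")
        = ((pvGetClassName d0 :: rest.map pvGetClassName).any fun c => ["dog", "cat", "bird"].contains c) := by
      rw [Bool.eq_iff_iff]
      simp [List.any_eq_true, pvCategory_eq_animal]
    have e3 : ((pvGetClassName d0 :: rest.map pvGetClassName).any fun c => pvCategory c == "object")
        = ((pvGetClassName d0 :: rest.map pvGetClassName).any fun c => !(["person", "dog", "cat", "bird"].contains c)) := by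
      rw [Bool.eq_iff_iff]
      simp [List.any_eq_true, pvCategory_eq_object]
    rw [e1, e2, e3]
    have htot := pvCategory_total (pvGetClassName d0)
    clear key e1 e2 e3
    have hor : ((pvGetClassName d0 :: rest.map pvGetClassName).contains "person"
        || ((pvGetClassName d0 :: rest.map pvGetClassName).any fun c => ["dog", "cat", "bird"].contains c)
        || ((pvGetClassName d0 :: rest.map pvGetClassName).any fun c => !(["person", "dog", "cat", "bird"].contains c))) = true := by
      rcases htot with h | h | h
      · have hp := (pvCategory_eq_human _).mp h
        simp [List.contains_eq_mem, hp]
      · have hp := (pvCategory_eq_animal _).mp h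
        simp only [Bool.or_eq_true, List.any_eq_true]
        refine Or.inl (Or.inr ⟨pvGetClassName d0, List.mem_cons_self, ?_⟩)
        simp [List.contains_eq_mem]
        tauto
      · have hp := (pvCategory_eq_object _).mp h
        simp only [Bool.or_eq_true, List.any_eq_true]
        refine Or.inr ⟨pvGetClassName d0, List.mem_cons_self, ?_⟩
        push_neg at hp
        simp [List.contains_eq_mem, hp]
    rcases Bool.dichotomy ((pvGetClassName d0 :: rest.map pvGetClassName).contains "person") with hb1 | hb1 <;>
    rcases Bool.dichotomy ((pvGetClassName d0 :: rest.map pvGetClassName).any fun c => ["dog", "cat", "bird"].contains c) with hb2 | hb2 <;>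
    rcases Bool.dichotomy ((pvGetClassName d0 :: rest.map pvGetClassName).any fun c => !(["person", "dog", "cat", "bird"].contains c)) with hb3 | hb3 <;>
    simp only [hb1, hb2, hb3] at hor ⊢ <;> first | exact absurd hor (by decide) | decide

-- ===== VERDICT (by name: the statement is the Claim_ definition above) =====
theorem classify_intrusion_type_spec : Claim_equal_classify_intrusion_type := by
  intro detections _ _
  unfold Spec_classify_intrusion_type
  exact classify_eq detections
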